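-- pv_equiv track=rewrite | github.com/heathermacgregor/workflow_16s | src/workflow_16s/diversity/helpers.py | handle_duplicate_ids
-- ===== SOURCE A (Python) =====
-- def handle_duplicate_ids(ids: list) -> list:
--     """Resolve duplicate sample IDs by appending numerical suffixes.
--
--     Ensures all sample identifiers are unique by appending numerical suffixes
--     to duplicate entries while preserving original identifiers when possible.
--
--     Example:
--         Input: ['A', 'B', 'A'] → Output: ['A_1', 'B', 'A_2']
--
--     Args:
--         ids :
--             List of original sample identifiers
--
--     Returns:
--         List of unique identifiers with duplicates disambiguated
--     """
--     seen = {}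
--     new_ids = []
--     for sample_id in ids:
--         count = seen.get(sample_id, 0) + 1
--         seen[sample_id] = count
--         new_ids.append(f"{sample_id}_{count}" if count > 1 else sample_id)
--     return new_ids
-- ===== SOURCE B (Python) =====
-- def handle_duplicate_ids(ids: list) -> list:
--     """Group-then-scatter: map each id to its occurrence indices, then write
--     the bare id at its first index and id_j (j>=2) at later ones."""
--     groups = {}
--     for i, sample_id in enumerate(ids):
--         groups.setdefault(sample_id, []).append(i)
--     result = [''] * len(ids)
--     for sample_id, idxs in groups.items():
--         for j, idx in enumerate(idxs):
--             result[idx] = sample_id if j == 0 else f"{sample_id}_{j + 1}"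
--     return result
-- ===== Notes on version B (the rewrite author's own statement) =====
-- stated objective: alternative
-- what changed: Replaces the running-counter single pass (dict of counts, emit while scanning) by a two-phase group-then-scatter: one pass builds a dict from each id to its list of occurrence indices, then a second pass writes the bare id at its first index and id_j at its j-th occurrence into a preallocated result list.
import Mathlib
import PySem

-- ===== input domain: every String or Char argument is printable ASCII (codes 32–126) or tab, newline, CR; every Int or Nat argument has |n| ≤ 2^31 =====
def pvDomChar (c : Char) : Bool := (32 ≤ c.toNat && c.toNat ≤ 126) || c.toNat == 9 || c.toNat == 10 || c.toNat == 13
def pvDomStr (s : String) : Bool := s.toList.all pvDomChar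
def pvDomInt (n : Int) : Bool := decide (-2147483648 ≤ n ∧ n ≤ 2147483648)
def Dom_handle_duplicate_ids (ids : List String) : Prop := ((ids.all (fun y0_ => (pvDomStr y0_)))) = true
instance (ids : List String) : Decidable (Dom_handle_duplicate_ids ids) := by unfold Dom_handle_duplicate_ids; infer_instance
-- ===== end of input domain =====

-- B replaces A's running-counter single pass by a group-indices-then-scatter two-phase pass (alternative decomposition, same cost).

-- ===== PORT A =====
def handle_duplicate_ids (ids : List String) : List String :=
  (ids.foldl
    (fun (st : PySem.Dict String Int × List String) sample_id =>
      let count := st.1.getD sample_id 0 + 1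
      (st.1.insert sample_id count,
       st.2 ++ [if count > 1 then sample_id ++ "_" ++ PySem.Int.toStr count else sample_id]))
    (PySem.Dict.empty, [])).2

-- ===== PORT B =====
def handle_duplicate_ids_alt (ids : List String) : List String :=
  let groups : PySem.Dict String (List Int) :=
    (PySem.List.enumerate ids 0).foldl
      (fun g p => g.modify p.2 [] (fun l => l ++ [p.1])) PySem.Dict.empty
  let result : List String := PySem.List.pyRepeat [""] (ids.length : Int)
  groups.items.foldl
    (fun r sL =>
      (PySem.List.enumerate sL.2 0).foldl
        (fun r q =>
          PySem.List.pySetD r q.2 (if q.1 == 0 then sL.1 else sL.1 ++ "_" ++ PySem.Int.toStr (q.1 + 1)))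
        r)
    result

-- ===== PRECONDITION & SPEC =====
def Spec_handle_duplicate_ids (ids : List String) (out : List String) : Prop := out = handle_duplicate_ids_alt ids
instance (ids : List String) (out : List String) : Decidable (Spec_handle_duplicate_ids ids out) := by unfold Spec_handle_duplicate_ids; infer_instance

-- ===== CLAIM (what is proved, stated in full; the proofs are below) =====
def Claim_equal_handle_duplicate_ids : Prop := ∀ (ids : List String), Dom_handle_duplicate_ids ids → Spec_handle_duplicate_ids ids (handle_duplicate_ids ids)

-- ===== LEMMAS AND PROOFS =====

-- the common specification value at position i: suffix from the number of earlier occurrences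
def pvVal (s : String) (cnt : Nat) : String :=
  if (cnt : Int) + 1 > 1 then s ++ "_" ++ PySem.Int.toStr ((cnt : Int) + 1) else s

-- occurrence indices of s in ids, as port B's grouping produces them (enumerate from t)
def pvOcc (t : Int) (ids : List String) (s : String) : List Int :=
  ((PySem.List.enumerate ids t).filter (fun p => p.2 == s)).map (·.1)

-- ===== side A =====

lemma pvA_go (ids : List String) (pre : List String) (seen : PySem.Dict String Int) (acc : List String)
    (hinv : ∀ x, seen.getD x 0 = (pre.count x : Int)) :
    (ids.foldl
      (fun (st : PySem.Dict String Int × List String) sample_id =>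
        let count := st.1.getD sample_id 0 + 1
        (st.1.insert sample_id count,
         st.2 ++ [if count > 1 then sample_id ++ "_" ++ PySem.Int.toStr count else sample_id]))
      (seen, acc)).2
    = acc ++ (List.range ids.length).map (fun k => pvVal (ids.getD k "") ((pre ++ ids.take k).count (ids.getD k ""))) := by
  induction ids generalizing pre seen acc with
  | nil => simp
  | cons x ids ih =>
    have hinv' : ∀ y, (seen.insert x (seen.getD x 0 + 1)).getD y 0 = ((pre ++ [x]).count y : Int) := by
      intro y
      rw [PySem.Dict.getD_insert]
      by_cases hy : y = x
      · subst hy; simp [hinv y, List.count_append]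
      · simp only [if_neg hy, hinv y, List.count_append, List.count_singleton]
        norm_num
        intro h; exact hy h.symm
    simp only [List.foldl_cons]
    rw [ih (pre ++ [x]) _ _ hinv']
    have h0 : (if seen.getD x 0 + 1 > 1 then x ++ "_" ++ PySem.Int.toStr (seen.getD x 0 + 1) else x)
        = pvVal x (pre.count x) := by
      simp [pvVal, hinv x]
    rw [List.length_cons, List.range_succ_eq_map]
    simp only [List.map_cons, List.map_map, h0]
    simp only [List.append_assoc, List.singleton_append, List.take_zero, List.append_nil,
      List.getD_cons_zero]
    have hmap := List.map_congr_left (l := List.range ids.length)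
      (f := fun k => pvVal (ids.getD k "") (List.count (ids.getD k "") (pre ++ x :: List.take k ids)))
      (g := (fun k => pvVal ((x :: ids).getD k "") (List.count ((x :: ids).getD k "") (pre ++ List.take k (x :: ids)))) ∘ Nat.succ)
      (by intro k _; simp)
    rw [hmap]

-- ===== side B: grouping =====

lemma pvOcc_cons (t : Int) (x : String) (ids : List String) (s : String) :
    pvOcc t (x :: ids) s = (if x == s then [t] else []) ++ pvOcc (t+1) ids s := by
  simp only [pvOcc, PySem.List.enumerate_cons, List.filter_cons]
  split_ifs with h <;> simp

lemma pvGroups_getD (ids : List String) : ∀ (t : Int) (g : PySem.Dict String (List Int)) (s : String),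
    ((PySem.List.enumerate ids t).foldl
      (fun g p => g.modify p.2 [] (fun l => l ++ [p.1])) g).getD s []
    = g.getD s [] ++ pvOcc t ids s := by
  induction ids with
  | nil => intro t g s; simp [pvOcc]
  | cons x ids ih =>
    intro t g s
    rw [PySem.List.enumerate_cons, List.foldl_cons, ih (t+1), PySem.Dict.getD_modify, pvOcc_cons]
    by_cases hs : s = x
    · subst hs; simp
    · have : ¬ (x == s) := by simpa using fun h => hs h.symm
      simp [hs, this]

lemma pvOcc_mem (ids : List String) (t : Int) (s : String) (i : Int) (h : i ∈ pvOcc t ids s) :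
    ∃ k : Nat, i = t + k ∧ k < ids.length ∧ ids.getD k "" = s := by
  simp only [pvOcc, List.mem_map, List.mem_filter] at h
  obtain ⟨p, ⟨hp, hps⟩, hpi⟩ := h
  rw [PySem.List.mem_enumerate_iff] at hp
  obtain ⟨k, hk, rfl⟩ := hp
  refine ⟨k, by simpa using hpi.symm, hk, ?_⟩
  rw [List.getD_eq_getElem ids "" hk]
  simpa using hps

lemma pvOcc_pairwise (ids : List String) (t : Int) (s : String) :
    (pvOcc t ids s).Pairwise (· < ·) := by
  apply List.pairwise_map.mpr
  exact List.Pairwise.sublist List.filter_sublist (PySem.List.pairwise_lt_enumerate ids t)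

lemma pvOcc_getElem (ids : List String) : ∀ (t : Int) (s : String) (k : Nat), k < ids.length → ids.getD k "" = s →
    (pvOcc t ids s)[(ids.take k).count s]? = some (t + k) := by
  induction ids with
  | nil => intro t s k hk _; simp at hk
  | cons x ids ih =>
    intro t s k hk hs
    rw [pvOcc_cons]
    match k with
    | 0 =>
      have hx : x = s := by simpa using hs
      subst hx
      simp
    | k+1 =>
      rw [List.take_succ_cons, List.count_cons]
      have hk' : k < ids.length := by simpa using hk
      have hs' : ids.getD k "" = s := by simpa using hs
      by_cases hxs : x = s
      · subst hxs
        simp only [beq_self_eq_true, if_true]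
        have := ih (t+1) x k hk' hs'
        rw [List.singleton_append, List.getElem?_cons_succ, this]
        congr 1; omega
      · have hb : (x == s) = false := by simpa using hxs
        rw [hb]
        simp only [Bool.false_eq_true, if_false, List.nil_append, Nat.add_zero]
        rw [ih (t+1) s k hk' hs']
        congr 1; omega

-- ===== side B: scatter =====

lemma pvScatter_length (ws : List (Int × String)) : ∀ (r : List String),
    (ws.foldl (fun r w => PySem.List.pySetD r w.1 w.2) r).length = r.length := by
  induction ws with
  | nil => intro r; rfl
  | cons w ws ih => intro r; simp [List.foldl_cons, ih, PySem.List.length_pySetD]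

lemma pvScatter_untouched (ws : List (Int × String)) : ∀ (r : List String) (i : Nat),
    (∀ p ∈ ws, 0 ≤ p.1) → (∀ p ∈ ws, p.1 ≠ (i : Int)) →
    (ws.foldl (fun r w => PySem.List.pySetD r w.1 w.2) r)[i]? = r[i]? := by
  induction ws with
  | nil => intro r i _ _; rfl
  | cons w ws ih =>
    intro r i hpos hne
    rw [List.foldl_cons, ih _ i (fun p hp => hpos p (List.mem_cons_of_mem _ hp))
      (fun p hp => hne p (List.mem_cons_of_mem _ hp))]
    rw [PySem.List.pySetD_of_nonneg _ _ (hpos w (List.mem_cons_self))]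
    apply List.getElem?_set_ne
    have h1 := hpos w List.mem_cons_self
    have h2 := hne w List.mem_cons_self
    omega

lemma pvScatter_hit (ws : List (Int × String)) : ∀ (r : List String) (i : Nat) (v : String),
    ((i : Int), v) ∈ ws → (ws.map (·.1)).Nodup → (∀ p ∈ ws, 0 ≤ p.1) → i < r.length →
    (ws.foldl (fun r w => PySem.List.pySetD r w.1 w.2) r)[i]? = some v := by
  induction ws with
  | nil => intro r i v h; simp at h
  | cons w ws ih =>
    intro r i v hmem hnd hpos hi
    rw [List.map_cons, List.nodup_cons] at hnd
    rcases List.mem_cons.mp hmem with heq | hmem'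
    · rw [List.foldl_cons]
      rw [pvScatter_untouched ws _ i (fun p hp => hpos p (List.mem_cons_of_mem _ hp)) ?_]
      · rw [← heq, PySem.List.pySetD_of_nonneg _ _ (by simp)]
        simp only [Int.toNat_natCast]
        exact List.getElem?_set_self hi
      · intro p hp hpi
        apply hnd.1
        rw [← heq]
        exact List.mem_map.mpr ⟨p, hp, hpi⟩
    · rw [List.foldl_cons]
      exact ih _ i v hmem' hnd.2 (fun p hp => hpos p (List.mem_cons_of_mem _ hp))
        (by rw [PySem.List.length_pySetD]; exact hi)

lemma pvFoldFlat (v : String → Int → String) (items : List (String × List Int)) :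
    ∀ (r : List String),
    items.foldl (fun r sL => (PySem.List.enumerate sL.2 0).foldl
        (fun r q => PySem.List.pySetD r q.2 (v sL.1 q.1)) r) r
    = (items.flatMap (fun sL => (PySem.List.enumerate sL.2 0).map
        (fun q => (q.2, v sL.1 q.1)))).foldl (fun r w => PySem.List.pySetD r w.1 w.2) r := by
  induction items with
  | nil => intro r; rfl
  | cons sL items ih =>
    intro r
    rw [List.foldl_cons, List.flatMap_cons, List.foldl_append, ih, List.foldl_map]

lemma pvFlat_nodup (ids : List String) (K : List String) (hK : K.Nodup) :
    (K.flatMap (fun s => pvOcc 0 ids s)).Nodup := by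
  induction K with
  | nil => simp
  | cons s K ih =>
    rw [List.nodup_cons] at hK
    rw [List.flatMap_cons, List.nodup_append]
    refine ⟨(pvOcc_pairwise ids 0 s).nodup, ih hK.2, ?_⟩
    intro a ha b hb hab
    subst hab
    obtain ⟨k, hk1, hk2, hk3⟩ := pvOcc_mem ids 0 s a ha
    obtain ⟨s', hs', hbs'⟩ := List.mem_flatMap.mp hb
    obtain ⟨k', hk1', hk2', hk3'⟩ := pvOcc_mem ids 0 s' a hbs'
    have hkk : k = k' := by omega
    subst hkk
    have hss : s = s' := by rw [← hk3, ← hk3']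
    exact hK.1 (hss ▸ hs')

-- ===== main =====

theorem pvMain (ids : List String) : handle_duplicate_ids ids = handle_duplicate_ids_alt ids := by
  -- the common specification
  set n := ids.length with hn
  set spec := (List.range n).map
    (fun k => pvVal (ids.getD k "") ((ids.take k).count (ids.getD k ""))) with hspec
  -- A equals spec
  have hA : handle_duplicate_ids ids = spec := by
    unfold handle_duplicate_ids
    rw [pvA_go ids [] PySem.Dict.empty [] (by intro x; simp [PySem.Dict.getD_empty])]
    simp [hspec, hn]
  -- B side
  unfold handle_duplicate_ids_alt
  simp only []
  set G := (PySem.List.enumerate ids 0).foldl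
      (fun g p => g.modify p.2 [] (fun l => l ++ [p.1])) PySem.Dict.empty with hG
  have hKnd : G.keys.Nodup := by
    rw [hG]
    exact PySem.Dict.nodup_keys_foldl_modify_key _ (fun p : Int × String => p.2) [] _ _
      (by rw [PySem.Dict.keys_empty]; exact List.nodup_nil)
  have hKmem : ∀ s, s ∈ G.keys ↔ s ∈ ids := by
    intro s
    rw [hG, PySem.Dict.keys_foldl_modify_key, PySem.Set.mem_update, PySem.Dict.keys_empty]
    simp [PySem.List.map_snd_enumerate]
  have hGetD : ∀ s, G.getD s [] = pvOcc 0 ids s := by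
    intro s; rw [hG, pvGroups_getD, PySem.Dict.getD_empty, List.nil_append]
  have hItems : G.items = G.keys.map (fun s => (s, pvOcc 0 ids s)) := by
    rw [PySem.Dict.items_eq_map_keys G hKnd []]
    exact List.map_congr_left (fun s _ => by rw [hGetD s])
  rw [hItems, pvFoldFlat (fun s j => if j == 0 then s else s ++ "_" ++ PySem.Int.toStr (j + 1)),
    List.flatMap_map]
  set ws := G.keys.flatMap (fun s => (PySem.List.enumerate (pvOcc 0 ids s) 0).map
      (fun q => (q.2, if q.1 == 0 then s else s ++ "_" ++ PySem.Int.toStr (q.1 + 1)))) with hws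
  set init := PySem.List.pyRepeat [""] (n : Int) with hinit
  have hinitlen : init.length = n := by
    rw [hinit, PySem.List.pyRepeat_singleton, List.length_replicate]; omega
  -- facts about the writes
  have hfst : ws.map (·.1) = G.keys.flatMap (fun s => pvOcc 0 ids s) := by
    simp [hws, List.map_flatMap, List.map_map, Function.comp_def, PySem.List.map_snd_enumerate]
  have hposw : ∀ p ∈ ws, 0 ≤ p.1 := by
    intro p hp
    rw [hws] at hp
    obtain ⟨s, hs, hp2⟩ := List.mem_flatMap.mp hp
    obtain ⟨q, hq, rfl⟩ := List.mem_map.mp hp2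
    rw [PySem.List.mem_enumerate_iff] at hq
    obtain ⟨k, hk, rfl⟩ := hq
    have hmem : (pvOcc 0 ids s)[k] ∈ pvOcc 0 ids s := List.getElem_mem _
    obtain ⟨k', hk1', _, _⟩ := pvOcc_mem ids 0 s _ hmem
    simp only []
    omega
  have hndw : (ws.map (·.1)).Nodup := by
    rw [hfst]; exact pvFlat_nodup ids G.keys hKnd
  rw [hA]
  apply List.ext_getElem?
  intro i
  by_cases hi : i < n
  · have hspecI : spec[i]? = some (pvVal (ids.getD i "") ((ids.take i).count (ids.getD i ""))) := by
      rw [hspec, List.getElem?_map, List.getElem?_range hi]; rfl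
    set s := ids.getD i "" with hsdef
    set cnt := (ids.take i).count s with hcnt
    have hsmem : s ∈ ids := by
      rw [hsdef, List.getD_eq_getElem ids "" (by omega)]; exact List.getElem_mem _
    have hwmem : ((i : Int), pvVal s cnt) ∈ ws := by
      rw [hws]
      apply List.mem_flatMap.mpr
      refine ⟨s, (hKmem s).mpr hsmem, ?_⟩
      have hocc := pvOcc_getElem ids 0 s i (by omega) hsdef.symm
      have henum : (PySem.List.enumerate (pvOcc 0 ids s) 0)[cnt]? = some ((cnt : Int), (i : Int)) := by
        rw [PySem.List.getElem?_enumerate, hcnt, hocc]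
        simp
      have hpair : (((cnt : Int)), ((i : Int))) ∈ PySem.List.enumerate (pvOcc 0 ids s) 0 :=
        List.mem_of_getElem? henum
      apply List.mem_map.mpr
      refine ⟨((cnt : Int), (i : Int)), hpair, ?_⟩
      by_cases hc : cnt = 0
      · rw [hc]; simp [pvVal]
      · have h1 : ((cnt : Int)) + 1 > 1 := by
          have : (0:Int) < (cnt : Int) := by exact_mod_cast Nat.pos_of_ne_zero hc
          omega
        simp [pvVal, h1]
        exact fun h => absurd h hc
    rw [hspecI, pvScatter_hit ws init i _ hwmem hndw hposw (by rw [hinitlen]; exact hi)]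
  · have h1 : spec[i]? = none := by
      rw [hspec, List.getElem?_eq_none]
      simp only [List.length_map, List.length_range]
      omega
    have h2 : (ws.foldl (fun r w => PySem.List.pySetD r w.1 w.2) init)[i]? = none := by
      rw [List.getElem?_eq_none]
      rw [pvScatter_length, hinitlen]
      omega
    rw [h1, h2]

-- ===== VERDICT (by name: the statement is the Claim_ definition above) =====
theorem handle_duplicate_ids_spec : Claim_equal_handle_duplicate_ids := by
  intro ids _
  unfold Spec_handle_duplicate_ids
  exact pvMain ids
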